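-- pv_equiv track=rewrite | github.com/joeedh/fairmotion | tools/extjs_cc/js_typelogger.py | apply_inserts
-- ===== SOURCE A (Python) =====
-- def apply_inserts(node, typespace, inserts, buf):
--     inserts.sort(key = lambda key : key[0])
--
--     off = 0
--     for it in inserts:
--         i, s = it
--         i += off
--
--         buf = buf[:i] + s + buf[i:]
--         off += len(s)
--         pass
--
--     return buf
-- ===== SOURCE B (Python) =====
-- def apply_inserts(node, typespace, inserts, buf):
--     # Single pass: split buf at the (sorted, clamped) insert positions and
--     # join segments and insert strings once.  (Does not sort `inserts` in
--     # place as A does; equivalence is about the return value.)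
--     n = len(buf)
--     parts = []
--     prev = 0
--     for i, s in sorted(inserts, key=lambda it: it[0]):
--         p = i if i < n else n
--         parts.append(buf[prev:p])
--         parts.append(s)
--         prev = p
--     parts.append(buf[prev:])
--     return "".join(parts)
-- ===== Notes on version B (the rewrite author's own statement) =====
-- stated objective: faster
-- what changed: A rebuilds the whole buffer string once per insert while tracking a running offset; B sorts once, clamps each position, splits the original buffer at those positions in a single pass and joins segments and insert strings once.
-- outside the precondition, e.g. on apply_inserts(0, 0, [(-1, 'a'), (0, 'b')], 'xy'): A returns 'xbay', B returns 'xabxy'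
import Mathlib
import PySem

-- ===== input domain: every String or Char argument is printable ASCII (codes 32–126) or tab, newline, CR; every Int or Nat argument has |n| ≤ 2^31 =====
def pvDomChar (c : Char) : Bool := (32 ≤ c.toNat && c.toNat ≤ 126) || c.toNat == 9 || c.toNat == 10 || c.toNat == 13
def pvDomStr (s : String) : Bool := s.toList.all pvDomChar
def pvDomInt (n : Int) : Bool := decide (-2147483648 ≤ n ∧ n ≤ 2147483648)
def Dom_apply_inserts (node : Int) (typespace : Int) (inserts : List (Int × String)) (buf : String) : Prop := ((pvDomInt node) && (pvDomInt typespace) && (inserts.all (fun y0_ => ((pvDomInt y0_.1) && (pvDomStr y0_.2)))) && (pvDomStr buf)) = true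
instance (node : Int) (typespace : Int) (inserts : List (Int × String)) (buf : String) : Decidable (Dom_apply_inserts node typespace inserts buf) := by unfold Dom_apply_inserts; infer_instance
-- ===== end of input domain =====

-- B replaces A's repeated whole-buffer reconstruction (one new string per insert) by a single
-- split-at-sorted-positions-and-join pass; equivalence is about the return value only (A sorts
-- `inserts` in place, B does not mutate it).


-- ===== PORT A =====
-- one loop step of A: i = it[0] + off; buf = buf[:i] + s + buf[i:]; off += len(s)
def pvStepA (st : Int × List Char) (it : Int × String) : Int × List Char :=
  let i := it.1 + st.1
  (st.1 + (it.2.toList.length : Int),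
   PySem.List.slice st.2 none (some i) ++ it.2.toList ++ PySem.List.slice st.2 (some i) none)

def apply_inserts (node : Int) (typespace : Int) (inserts : List (Int × String)) (buf : String) : String :=
  let ins := PySem.List.sorted inserts (fun it => it.1)
  (String.ofList (ins.foldl pvStepA ((0 : Int), buf.toList)).2)

-- ===== PORT B =====
-- one loop step of B over the original buffer c: clamp position, emit segment + insert string
def pvStepB (c : List Char) (st : List (List Char) × Int) (it : Int × String) : List (List Char) × Int :=
  let p := if it.1 < (c.length : Int) then it.1 else (c.length : Int)
  (st.1 ++ [PySem.List.slice c (some st.2) (some p), it.2.toList], p)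

def apply_inserts_alt (node : Int) (typespace : Int) (inserts : List (Int × String)) (buf : String) : String :=
  let c := buf.toList
  let r := (PySem.List.sorted inserts (fun it => it.1)).foldl (pvStepB c) ([], (0 : Int))
  String.ofList (PySem.Chars.join [] (r.1 ++ [PySem.List.slice c (some r.2) none]))

-- ===== PRECONDITION & SPEC =====
-- Pre_ excludes inserts at negative offsets: there A's end-relative slice positions are taken in
-- the progressively grown buffer (the accumulated shift is applied on top of the end-relative
-- wrap), an accidental placement, while B reads them relative to the original buffer; on such a
-- corner neither placement is the specified one.
def Pre_apply_inserts (node : Int) (typespace : Int) (inserts : List (Int × String)) (buf : String) : Prop :=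
  ∀ it ∈ inserts, 0 ≤ it.1
instance (node : Int) (typespace : Int) (inserts : List (Int × String)) (buf : String) : Decidable (Pre_apply_inserts node typespace inserts buf) := by unfold Pre_apply_inserts; infer_instance

def pvWitness_apply_inserts : Int × Int × (List (Int × String)) × String := (0, 0, [(4, "!"), (0, "ab"), (2, "Z")], "hello")

def Spec_apply_inserts (node : Int) (typespace : Int) (inserts : List (Int × String)) (buf : String) (out : String) : Prop := out = apply_inserts_alt node typespace inserts buf
instance (node : Int) (typespace : Int) (inserts : List (Int × String)) (buf : String) (out : String) : Decidable (Spec_apply_inserts node typespace inserts buf out) := by unfold Spec_apply_inserts; infer_instance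

-- ===== CLAIM (what is proved, stated in full; the proofs are below) =====
def Claim_equal_apply_inserts : Prop := ∀ (node : Int) (typespace : Int) (inserts : List (Int × String)) (buf : String), Dom_apply_inserts node typespace inserts buf → Pre_apply_inserts node typespace inserts buf → Spec_apply_inserts node typespace inserts buf (apply_inserts node typespace inserts buf)

-- ===== LEMMAS AND PROOFS =====

-- "".join(parts) with empty separator is flatten
lemma pv_join (parts : List (List Char)) : PySem.Chars.join [] parts = parts.flatten := by
  show List.intercalate [] parts = parts.flatten
  induction parts with
  | nil => rfl
  | cons h t ih =>
    cases t with
    | nil => simp [List.intercalate]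
    | cons h2 t2 => simp_all [List.intercalate, List.intersperse]

-- B's running split position stays nonnegative
lemma pv_prev_nonneg (c : List Char) :
    ∀ (ins : List (Int × String)) (acc : List (List Char)) (prev : Int),
      0 ≤ prev → (∀ it ∈ ins, 0 ≤ it.1) →
      0 ≤ (ins.foldl (pvStepB c) (acc, prev)).2 := by
  intro ins
  induction ins with
  | nil => intro acc prev h0 _; exact h0
  | cons it rest ih =>
    intro acc prev h0 hk
    simp only [List.foldl_cons, pvStepB]
    apply ih
    · have := hk it (by simp)
      split <;> [exact this; positivity]
    · intro jt hjt; exact hk jt (by simp [hjt])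

-- Loop correspondence: A's fold state is determined by B's fold state — the working buffer is
-- (flatten of B's emitted parts) ++ (the untouched tail of the original buffer), and A's offset
-- is (length of the emitted parts) - (B's split position).
lemma pv_loop (c : List Char) :
    ∀ (ins : List (Int × String)) (acc : List (List Char)) (prev off : Int),
      0 ≤ prev → prev ≤ (c.length : Int) →
      (∀ it ∈ ins, prev ≤ it.1) →
      ins.Pairwise (fun a b => a.1 ≤ b.1) →
      off = (acc.flatten.length : Int) - prev →
      ins.foldl pvStepA (off, acc.flatten ++ c.drop prev.toNat)
        = (((ins.foldl (pvStepB c) (acc, prev)).1.flatten.length : Int)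
             - (ins.foldl (pvStepB c) (acc, prev)).2,
           (ins.foldl (pvStepB c) (acc, prev)).1.flatten
             ++ c.drop (ins.foldl (pvStepB c) (acc, prev)).2.toNat) := by
  intro ins
  induction ins with
  | nil =>
    intro acc prev off h0 h1 _ _ hoff
    simp [hoff]
  | cons it rest ih =>
    intro acc prev off h0 h1 hk hp hoff
    obtain ⟨i, s⟩ := it
    have hpi : prev ≤ i := hk (i, s) (by simp)
    have hiL : (0:Int) ≤ (c.length : Int) := by positivity
    set p : Int := if i < (c.length : Int) then i else (c.length : Int) with hpdef
    have hp1 : prev ≤ p := by rw [hpdef]; split <;> omega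
    have hp2 : p ≤ (c.length : Int) := by rw [hpdef]; split <;> omega
    have hp3 : (0:Int) ≤ p := le_trans h0 hp1
    -- index arithmetic
    have hidx : (0:Int) ≤ i + off := by omega
    have hidxN : (i + off).toNat = acc.flatten.length + (i.toNat - prev.toNat) := by omega
    have hprevN : (prev.toNat : Int) = prev := Int.toNat_of_nonneg h0
    have hpN : (p.toNat : Int) = p := Int.toNat_of_nonneg hp3
    have hpNle : p.toNat ≤ c.length := by omega
    have hprevNle : prev.toNat ≤ c.length := by omega
    -- the emitted middle segment and its length
    have hsl : PySem.List.slice c (some prev) (some p)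
        = (c.drop prev.toNat).take (p.toNat - prev.toNat) :=
      PySem.List.slice_toNat c h0 hp3
    have hsllen : (PySem.List.slice c (some prev) (some p)).length = p.toNat - prev.toNat := by
      rw [hsl]; simp; omega
    -- A's prefix slice
    have htake : PySem.List.slice (acc.flatten ++ c.drop prev.toNat) none (some (i + off))
        = acc.flatten ++ PySem.List.slice c (some prev) (some p) := by
      rw [PySem.List.slice_to _ hidx, hsl, List.take_append, hidxN]
      congr 1
      · exact List.take_of_length_le (by omega)
      · rw [List.take_eq_take_iff]
        simp
        rw [hpdef]; split <;> omega
    -- A's suffix slice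
    have hdrop : PySem.List.slice (acc.flatten ++ c.drop prev.toNat) (some (i + off)) none
        = c.drop p.toNat := by
      rw [PySem.List.slice_from _ hidx, List.drop_append, hidxN]
      rw [List.drop_eq_nil_of_le (by omega), List.drop_drop]
      simp only [List.nil_append]
      by_cases hc : i < (c.length : Int)
      · congr 1
        rw [hpdef, if_pos hc]
        omega
      · rw [List.drop_eq_nil_of_le (by omega), List.drop_eq_nil_of_le (by omega)]
    -- one step of each fold
    simp only [List.foldl_cons]
    have hstepA : pvStepA (off, acc.flatten ++ c.drop prev.toNat) (i, s)
        = (off + (s.toList.length : Int),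
           (acc ++ [PySem.List.slice c (some prev) (some p), s.toList]).flatten
             ++ c.drop p.toNat) := by
      simp only [pvStepA, htake, hdrop, List.flatten_append, List.flatten_cons,
        List.flatten_nil, List.append_nil, List.append_assoc]
    have hstepB : pvStepB c (acc, prev) (i, s)
        = (acc ++ [PySem.List.slice c (some prev) (some p), s.toList], p) := by
      simp only [pvStepB, hpdef]
    rw [hstepA, hstepB]
    apply ih (acc ++ [PySem.List.slice c (some prev) (some p), s.toList]) p
      (off + (s.toList.length : Int)) hp3 hp2
    · intro jt hjt
      have := (List.pairwise_cons.mp hp).1 jt hjt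
      simp only at this
      rw [hpdef]; split <;> omega
    · exact (List.pairwise_cons.mp hp).2
    · simp only [List.flatten_append, List.flatten_cons, List.flatten_nil, List.append_nil,
        List.length_append, hsllen]
      push_cast
      omega

-- ===== VERDICT (by name: the statement is the Claim_ definition above) =====
theorem apply_inserts_spec : Claim_equal_apply_inserts := by
  intro node typespace inserts buf _hdom hpre
  simp only [Spec_apply_inserts, apply_inserts, apply_inserts_alt]
  have hkeys : ∀ it ∈ PySem.List.sorted inserts (fun it => it.1), (0:Int) ≤ it.1 := by
    intro it hit
    exact hpre it ((PySem.List.mem_sorted _ _ _ _).mp hit)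
  have hpair : (PySem.List.sorted inserts (fun it => it.1)).Pairwise
      (fun a b : Int × String => a.1 ≤ b.1) := PySem.List.sorted_pairwise inserts _
  have hloop := pv_loop buf.toList (PySem.List.sorted inserts (fun it => it.1)) [] 0 0
    le_rfl (by positivity) hkeys hpair (by simp)
  simp only [List.flatten_nil, List.nil_append, Int.toNat_zero, List.drop_zero] at hloop
  rw [hloop, pv_join]
  have h2 : (0:Int) ≤ ((PySem.List.sorted inserts (fun it => it.1)).foldl
      (pvStepB buf.toList) ([], 0)).2 :=
    pv_prev_nonneg buf.toList _ [] 0 le_rfl hkeys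
  rw [PySem.List.slice_from _ h2]
  simp
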